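-- pv_equiv track=rewrite | github.com/fcontr1975/andromeda | andromeda_backend.py | _material_candidates
-- ===== SOURCE A (Python) =====
-- from typing import Dict, List, Optional, Sequence, Set, Tuple
--
-- TEXTURE_ALIASES: Dict[str, List[str]] = {
--     "airport": ["airport"],
--     "default": ["grass", "airport"],
--     "grass": ["grass"],
--     "grasscover": ["grass"],
--     "grassland": ["grass"],
--     "intermittentstream": ["waterlake"],
--     "stream": ["waterlake"],
--     "canal": ["waterlake"],
--     "lake": ["waterlake", "frozenlake"],
--     "road": ["asphalt", "gravel"],
--     "freeway": ["asphalt"],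
--     "railroad": ["gravel", "darkgravel"],
--     "drycrop": ["drycrop"],
--     "mixedcrop": ["mixedcrop"],
--     "irrcroppasturecover": ["irrcrop", "cropgrass"],
--     "irrcrop": ["irrcrop"],
--     "deciduousforest": ["deciduous", "forest"],
--     "evergreenforest": ["evergreen", "coniferousforest"],
--     "scrub": ["shrub", "scrub"],
--     "scrubcover": ["shrub", "scrub"],
--     "urban": ["industrial", "city"],
--     "pctiedown": ["asphalt", "carpark"],
-- }
--
-- def _normalize_key(value: str) -> str:
--     return "".join(ch for ch in value.lower() if ch.isalnum())
--
-- def _material_candidates(material_name: str) -> List[str]: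
--     normalized = _normalize_key(material_name)
--     candidates = [normalized]
--
--     if normalized in TEXTURE_ALIASES:
--         candidates.extend(_normalize_key(name) for name in TEXTURE_ALIASES[normalized])
--
--     token: List[str] = []
--     for ch in material_name:
--         if ch.isupper() and token:
--             piece = _normalize_key("".join(token))
--             if len(piece) > 2:
--                 candidates.append(piece)
--             token = [ch]
--         elif ch.isalnum():
--             token.append(ch)
--         elif token:
--             piece = _normalize_key("".join(token))
--             if len(piece) > 2:
--                 candidates.append(piece)
--             token = []
--     if token:
--         piece = _normalize_key("".join(token))
--         if len(piece) > 2: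
--             candidates.append(piece)
--
--     if normalized.startswith("pa"):
--         candidates.extend(["airport", "asphalt"])
--
--     deduped: List[str] = []
--     seen = set()
--     for candidate in candidates:
--         if candidate and candidate not in seen:
--             seen.add(candidate)
--             deduped.append(candidate)
--     return deduped
-- ===== SOURCE B (Python) =====
-- from typing import Dict, List
--
-- TEXTURE_ALIASES: Dict[str, List[str]] = {
--     "airport": ["airport"],
--     "default": ["grass", "airport"],
--     "grass": ["grass"],
--     "grasscover": ["grass"],
--     "grassland": ["grass"],
--     "intermittentstream": ["waterlake"],
--     "stream": ["waterlake"],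
--     "canal": ["waterlake"],
--     "lake": ["waterlake", "frozenlake"],
--     "road": ["asphalt", "gravel"],
--     "freeway": ["asphalt"],
--     "railroad": ["gravel", "darkgravel"],
--     "drycrop": ["drycrop"],
--     "mixedcrop": ["mixedcrop"],
--     "irrcroppasturecover": ["irrcrop", "cropgrass"],
--     "irrcrop": ["irrcrop"],
--     "deciduousforest": ["deciduous", "forest"],
--     "evergreenforest": ["evergreen", "coniferousforest"],
--     "scrub": ["shrub", "scrub"],
--     "scrubcover": ["shrub", "scrub"],
--     "urban": ["industrial", "city"],
--     "pctiedown": ["asphalt", "carpark"],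
-- }
--
-- def _normalize_key(value: str) -> str:
--     return "".join(ch for ch in value.lower() if ch.isalnum())
--
-- def _material_candidates(material_name: str) -> List[str]:
--     normalized = _normalize_key(material_name)
--     candidates = [normalized]
--
--     if normalized in TEXTURE_ALIASES:
--         candidates.extend(_normalize_key(name) for name in TEXTURE_ALIASES[normalized])
--
--     # Delimit-then-split instead of a char-by-char accumulator state machine:
--     # emit an explicit boundary marker before every uppercase character, then
--     # the tokens are exactly the maximal alphanumeric runs of the marked text.
--     marked: List[str] = []
--     for ch in material_name:
--         if ch.isupper():
--             marked.append("\x00")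
--         marked.append(ch)
--     tokens: List[str] = []
--     run: List[str] = []
--     for ch in marked:
--         if ch.isalnum():
--             run.append(ch)
--         else:
--             if run:
--                 tokens.append("".join(run))
--             run = []
--     if run:
--         tokens.append("".join(run))
--     candidates.extend(p for p in (t.lower() for t in tokens) if len(p) > 2)
--
--     if normalized.startswith("pa"):
--         candidates.extend(["airport", "asphalt"])
--
--     deduped: List[str] = []
--     seen = set()
--     for candidate in candidates:
--         if candidate and candidate not in seen:
--             seen.add(candidate)
--             deduped.append(candidate)
--     return deduped
-- ===== Notes on version B (the rewrite author's own statement) =====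
-- stated objective: alternative
-- what changed: A's char-by-char token accumulator state machine is replaced by a delimit-then-split pass: emit a boundary marker before every uppercase character, then take the maximal alphanumeric runs of the marked text as tokens; normalize/alias/pa/dedup stages are unchanged.
import Mathlib
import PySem

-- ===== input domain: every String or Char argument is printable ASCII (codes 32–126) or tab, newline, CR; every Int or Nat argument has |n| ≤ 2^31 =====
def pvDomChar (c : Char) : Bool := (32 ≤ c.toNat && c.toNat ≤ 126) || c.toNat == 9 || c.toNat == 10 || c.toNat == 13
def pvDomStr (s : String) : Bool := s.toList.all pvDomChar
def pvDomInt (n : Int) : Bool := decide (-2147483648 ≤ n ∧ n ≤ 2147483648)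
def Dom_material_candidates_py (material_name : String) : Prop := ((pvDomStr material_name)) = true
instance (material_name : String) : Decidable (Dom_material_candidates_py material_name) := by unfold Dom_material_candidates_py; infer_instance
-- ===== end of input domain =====

-- B replaces A's char-by-char token state machine by a delimit-then-split pass
-- (mark a boundary before each uppercase char, then take maximal alnum runs);
-- objective: alternative decomposition, same cost.

-- ===== PORT A =====
-- shared module context: _normalize_key and TEXTURE_ALIASES (used verbatim by both Pythons)
def pyNormalizeKey (cs : List Char) : List Char :=
  (PySem.Chars.lower cs).filter PySem.Chars.isalnum

def normKey (s : String) : String := String.ofList (pyNormalizeKey s.toList)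

def textureAliases : PySem.Dict String (List String) :=
  PySem.Dict.ofList
    [ ("airport", ["airport"]), ("default", ["grass", "airport"]),
      ("grass", ["grass"]), ("grasscover", ["grass"]), ("grassland", ["grass"]),
      ("intermittentstream", ["waterlake"]), ("stream", ["waterlake"]),
      ("canal", ["waterlake"]), ("lake", ["waterlake", "frozenlake"]),
      ("road", ["asphalt", "gravel"]), ("freeway", ["asphalt"]),
      ("railroad", ["gravel", "darkgravel"]), ("drycrop", ["drycrop"]),
      ("mixedcrop", ["mixedcrop"]),
      ("irrcroppasturecover", ["irrcrop", "cropgrass"]), ("irrcrop", ["irrcrop"]),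
      ("deciduousforest", ["deciduous", "forest"]),
      ("evergreenforest", ["evergreen", "coniferousforest"]),
      ("scrub", ["shrub", "scrub"]), ("scrubcover", ["shrub", "scrub"]),
      ("urban", ["industrial", "city"]), ("pctiedown", ["asphalt", "carpark"]) ]

-- the final dedup loop, identical in both Pythons
def dedupLoop (cands : List String) (seen : PySem.Set String) (deduped : List String) : List String :=
  match cands with
  | [] => deduped
  | c :: rest =>
    if c ≠ "" ∧ PySem.Set.contains seen c = false then
      dedupLoop rest (PySem.Set.add seen c) (deduped ++ [c])
    else
      dedupLoop rest seen deduped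

-- A's token state machine (the for-loop over material_name plus the trailing flush)
def aLoop (cs : List Char) (candidates : List String) (token : List Char) : List String :=
  match cs with
  | [] =>
    if token ≠ [] then
      let piece := pyNormalizeKey token
      if piece.length > 2 then candidates ++ [String.ofList piece] else candidates
    else candidates
  | ch :: rest =>
    if PySem.Chars.isupper ch = true ∧ token ≠ [] then
      let piece := pyNormalizeKey token
      aLoop rest (if piece.length > 2 then candidates ++ [String.ofList piece] else candidates) [ch]
    else if PySem.Chars.isalnum ch = true then
      aLoop rest candidates (token ++ [ch])
    else if token ≠ [] then
      let piece := pyNormalizeKey token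
      aLoop rest (if piece.length > 2 then candidates ++ [String.ofList piece] else candidates) []
    else aLoop rest candidates token

def material_candidates_py (material_name : String) : List String :=
  let normalized := normKey material_name
  let candidates : List String := [normalized]
  let candidates :=
    match textureAliases.get? normalized with
    | some names => candidates ++ names.map (fun n => normKey n)
    | none => candidates
  let candidates := aLoop material_name.toList candidates []
  let candidates :=
    if PySem.Str.startswith normalized "pa" then candidates ++ ["airport", "asphalt"]
    else candidates
  dedupLoop candidates PySem.Set.empty []

-- ===== PORT B =====
-- emit a '\x00' boundary marker before each uppercase character
def markBoundaries (cs : List Char) : List Char :=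
  cs.flatMap (fun ch => if PySem.Chars.isupper ch = true then [Char.ofNat 0, ch] else [ch])

-- maximal alphanumeric runs of the marked text
def splitRuns : List Char → List Char → List (List Char)
  | [], run => if run = [] then [] else [run]
  | c :: rest, run =>
    if PySem.Chars.isalnum c = true then splitRuns rest (run ++ [c])
    else if run = [] then splitRuns rest []
    else run :: splitRuns rest []

def material_candidates_py_alt (material_name : String) : List String :=
  let normalized := normKey material_name
  let candidates : List String := [normalized]
  let candidates :=
    match textureAliases.get? normalized with
    | some names => candidates ++ names.map (fun n => normKey n)
    | none => candidates
  let tokens := splitRuns (markBoundaries material_name.toList) []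
  let candidates := candidates ++
    ((tokens.map (fun t => String.ofList (PySem.Chars.lower t))).filter
      (fun p => p.toList.length > 2))
  let candidates :=
    if PySem.Str.startswith normalized "pa" then candidates ++ ["airport", "asphalt"]
    else candidates
  dedupLoop candidates PySem.Set.empty []

-- ===== PRECONDITION & SPEC =====
def Spec_material_candidates_py (material_name : String) (out : List String) : Prop := out = material_candidates_py_alt material_name
instance (material_name : String) (out : List String) : Decidable (Spec_material_candidates_py material_name out) := by unfold Spec_material_candidates_py; infer_instance

-- ===== CLAIM (what is proved, stated in full; the proofs are below) =====
def Claim_equal_material_candidates_py : Prop := ∀ (material_name : String), Dom_material_candidates_py material_name → Spec_material_candidates_py material_name (material_candidates_py material_name)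

-- ===== LEMMAS AND PROOFS =====
theorem isalnum_lowerChar (c : Char) (h : PySem.Chars.isalnum c = true) :
    PySem.Chars.isalnum (PySem.Chars.lowerChar c) = true := by
  unfold PySem.Chars.lowerChar
  by_cases hu : PySem.Chars.isupper c = true
  · simp only [hu, if_true]
    have h1 : 65 ≤ c.toNat ∧ c.toNat ≤ 90 := by
      simp only [PySem.Chars.isupper, Bool.and_eq_true, decide_eq_true_eq, Char.le_def] at hu
      exact ⟨hu.1, hu.2⟩
    have hv : (c.toNat + 32).isValidChar := by left; omega
    simp only [PySem.Chars.isalnum, PySem.Chars.isalpha, PySem.Chars.isupper,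
      PySem.Chars.islower, PySem.Chars.isdigit, Char.le_def, Bool.or_eq_true,
      Bool.and_eq_true, decide_eq_true_eq]
    rw [show (Char.ofNat (c.toNat + 32)).val = UInt32.ofNat (c.toNat + 32) from Char.val_ofNat hv]
    left; right
    constructor <;>
      (rw [UInt32.le_iff_toNat_le]; simp [UInt32.toNat_ofNat]; omega)
  · simp [hu, h]

theorem isalnum_of_isupper (c : Char) (h : PySem.Chars.isupper c = true) :
    PySem.Chars.isalnum c = true := by
  simp [PySem.Chars.isalnum, PySem.Chars.isalpha, h]

theorem normKey_of_alnum (t : List Char) (h : ∀ c ∈ t, PySem.Chars.isalnum c = true) :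
    pyNormalizeKey t = PySem.Chars.lower t := by
  unfold pyNormalizeKey
  apply List.filter_eq_self.mpr
  intro c hc
  simp only [PySem.Chars.lower, List.mem_map] at hc
  obtain ⟨d, hd, rfl⟩ := hc
  exact isalnum_lowerChar d (h d hd)

theorem splitRuns_alnum_prefix (t : List Char) (h : ∀ c ∈ t, PySem.Chars.isalnum c = true) :
    ∀ (run ms : List Char), splitRuns (t ++ ms) run = splitRuns ms (run ++ t) := by
  induction t with
  | nil => intro run ms; simp
  | cons c t ih =>
    intro run ms
    have hc : PySem.Chars.isalnum c = true := h c (by simp)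
    have ht : ∀ d ∈ t, PySem.Chars.isalnum d = true := fun d hd => h d (by simp [hd])
    simp only [List.cons_append, splitRuns, hc, if_true, ih ht]
    simp

def piecesOf (ts : List (List Char)) : List String :=
  (ts.map (fun t => String.ofList (PySem.Chars.lower t))).filter (fun p => p.toList.length > 2)

theorem append_if_gt (cands : List String) (p : List Char) :
    (if p.length > 2 then cands ++ [String.ofList p] else cands) =
      cands ++ (if p.length > 2 then [String.ofList p] else []) := by
  split <;> simp

theorem piecesOf_cons_alnum (t : List Char) (ts : List (List Char))
    (h : ∀ c ∈ t, PySem.Chars.isalnum c = true) :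
    piecesOf (t :: ts) =
      (if (pyNormalizeKey t).length > 2 then [String.ofList (pyNormalizeKey t)] else [])
        ++ piecesOf ts := by
  simp only [piecesOf, List.map_cons, List.filter_cons, normKey_of_alnum t h]
  have hl : (String.ofList (PySem.Chars.lower t)).toList = PySem.Chars.lower t := by simp
  have hlen : (PySem.Chars.lower t).length = t.length := by simp [PySem.Chars.lower]
  by_cases h2 : (PySem.Chars.lower t).length > 2 <;> simp [hl, h2]

theorem splitRuns_nul (ms : List Char) (run : List Char) (hr : run ≠ []) :
    splitRuns (Char.ofNat 0 :: ms) run = run :: splitRuns ms [] := by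
  simp [splitRuns, show PySem.Chars.isalnum (Char.ofNat 0) = false from rfl, hr]

theorem aLoop_eq (cs : List Char) :
    ∀ (token : List Char) (cands : List String),
      (∀ c ∈ token, PySem.Chars.isalnum c = true) →
      aLoop cs cands token = cands ++ piecesOf (splitRuns (token ++ markBoundaries cs) []) := by
  induction cs with
  | nil =>
    intro token cands halnum
    have hsr : splitRuns (token ++ markBoundaries []) [] = splitRuns [] token := by
      simpa [markBoundaries] using splitRuns_alnum_prefix token halnum [] []
    rw [hsr]
    by_cases ht : token = []
    · simp [aLoop, ht, splitRuns, piecesOf]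
    · rw [show splitRuns [] token = [token] by simp [splitRuns, ht]]
      simp only [aLoop, ht, ne_eq, not_false_iff, if_true]
      rw [append_if_gt, piecesOf_cons_alnum token [] halnum]
      simp [piecesOf]
  | cons ch rest ih =>
    intro token cands halnum
    have hmark : markBoundaries (ch :: rest) =
        (if PySem.Chars.isupper ch = true then [Char.ofNat 0, ch] else [ch]) ++ markBoundaries rest := by
      simp [markBoundaries]
    rw [hmark]
    by_cases hu : PySem.Chars.isupper ch = true
    · have hca : PySem.Chars.isalnum ch = true := isalnum_of_isupper ch hu
      rw [if_pos hu]
      have hch : splitRuns (ch :: markBoundaries rest) [] = splitRuns (markBoundaries rest) [ch] := by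
        simp [splitRuns, hca]
      by_cases ht : token = []
      · -- empty token: A starts token [ch]; B's marker closes an empty run
        simp only [aLoop, hu, ht, ne_eq, not_true_eq_false, and_false, if_false, hca, if_true,
          List.nil_append]
        rw [ih [ch] cands (by simp [hca])]
        congr 2
      · -- nonempty token: A flushes it; B's marker closes the run holding it
        simp only [aLoop, hu, ht, ne_eq, not_false_iff, and_true, if_true]
        rw [ih [ch] _ (by simp [hca]), append_if_gt]
        simp only [List.singleton_append]
        have hs : splitRuns (token ++ ([Char.ofNat 0, ch] ++ markBoundaries rest)) []
            = token :: splitRuns (markBoundaries rest) [ch] := by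
          rw [show token ++ ([Char.ofNat 0, ch] ++ markBoundaries rest)
                = token ++ (Char.ofNat 0 :: ch :: markBoundaries rest) from rfl]
          rw [splitRuns_alnum_prefix token halnum [] (Char.ofNat 0 :: ch :: markBoundaries rest)]
          rw [List.nil_append, splitRuns_nul _ _ ht, hch]
        rw [hs, piecesOf_cons_alnum token _ halnum, hch]
        simp
    · rw [if_neg hu]
      by_cases hca : PySem.Chars.isalnum ch = true
      · -- plain alnum char: extend the token / the run
        simp only [aLoop, hu, hca, if_true]
        have halnum' : ∀ c ∈ token ++ [ch], PySem.Chars.isalnum c = true := by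
          intro c hc
          rcases List.mem_append.1 hc with h | h
          · exact halnum c h
          · simp at h; subst h; exact hca
        rw [ih (token ++ [ch]) cands halnum']
        simp
      · -- boundary char: both close the current token/run
        have hs0 : splitRuns (token ++ ([ch] ++ markBoundaries rest)) []
            = splitRuns (ch :: markBoundaries rest) token := by
          simpa using splitRuns_alnum_prefix token halnum [] (ch :: markBoundaries rest)
        rw [hs0]
        by_cases ht : token = []
        · have hA : aLoop (ch :: rest) cands token = aLoop rest cands token := by
            simp [aLoop, hu, hca, ht]
          rw [hA, ht, ih [] cands (by simp)]
          rw [show splitRuns (ch :: markBoundaries rest) [] = splitRuns (markBoundaries rest) [] by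
            simp [splitRuns, hca]]
          simp
        · have hA : aLoop (ch :: rest) cands token =
              aLoop rest (if (pyNormalizeKey token).length > 2
                then cands ++ [String.ofList (pyNormalizeKey token)] else cands) [] := by
            simp [aLoop, hu, hca, ht]
          rw [hA, ih [] _ (by simp), append_if_gt]
          rw [show splitRuns (ch :: markBoundaries rest) token
                = token :: splitRuns (markBoundaries rest) [] by
            simp [splitRuns, hca, ht]]
          rw [piecesOf_cons_alnum token _ halnum]
          simp

-- ===== VERDICT (by name: the statement is the Claim_ definition above) =====
theorem aLoop_nil (cs : List Char) (cands : List String) :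
    aLoop cs cands [] = cands ++
      (((splitRuns (markBoundaries cs) []).map (fun t => String.ofList (PySem.Chars.lower t))).filter
        (fun p => p.toList.length > 2)) := by
  simpa [piecesOf] using aLoop_eq cs [] cands (by simp)

theorem material_candidates_py_spec : Claim_equal_material_candidates_py := by
  intro s _
  unfold Spec_material_candidates_py material_candidates_py material_candidates_py_alt
  simp only [aLoop_nil]
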